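-- pv_equiv track=rewrite | github.com/tlgs/dailyprogrammer | Python/hard/h313.py | embed_word1
-- ===== SOURCE A (Python) =====
-- def embed_word1(word, solution):
--     '''Returns a new solution so that word is now embedded.
--        Explanation:
--     '''
--     missing_f, missing_b = [], []
--
--     for w, s, m in zip([word, word[::-1]], [solution, solution[::-1]], [missing_f, missing_b]):
--         curr_index = 0
--         for char in w:
--             result = s.find(char, curr_index)
--             if result == -1:
--                 m.append((char, curr_index))
--             else:
--                 curr_index = result + 1
--
--     missing = missing_f if len(missing_f) < len(missing_b) else missing_b
--     new_solution = list(solution) if len(missing_f) < len(missing_b) else list(solution[::-1])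
--
--     already_included = 0
--     for chars, pos in missing:
--         new_solution.insert(pos+already_included, chars)
--         already_included += 1
--
--     return ''.join(new_solution) if len(missing_f) < len(missing_b) else ''.join(new_solution[::-1])
-- ===== SOURCE B (Python) =====
-- def _weave(w, s):
--     # last occurrence index of every char of s: last[c] < j  iff  c does not occur in s[j:]
--     last = {}
--     for i, c in enumerate(s):
--         last[c] = i
--     out = []
--     j = 0
--     misses = 0
--     for c in w:
--         if last.get(c, -1) < j:
--             out.append(c)
--             misses += 1
--         else:
--             k = s.index(c, j)
--             out.append(s[j:k + 1])
--             j = k + 1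
--     out.append(s[j:])
--     return ''.join(out), misses
--
--
-- def embed_word1(word, solution):
--     forward, nf = _weave(word, solution)
--     backward, nb = _weave(word[::-1], solution[::-1])
--     return forward if nf < nb else backward[::-1]
-- ===== Notes on version B (the rewrite author's own statement) =====
-- stated objective: alternative
-- what changed: Replaces the two-phase record-missing-then-insert-with-shifts scheme by a single pass that emits the merged string directly, deciding whether a char can still be matched ahead via a precomputed last-occurrence dict instead of a full failed find-scan.
import Mathlib
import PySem

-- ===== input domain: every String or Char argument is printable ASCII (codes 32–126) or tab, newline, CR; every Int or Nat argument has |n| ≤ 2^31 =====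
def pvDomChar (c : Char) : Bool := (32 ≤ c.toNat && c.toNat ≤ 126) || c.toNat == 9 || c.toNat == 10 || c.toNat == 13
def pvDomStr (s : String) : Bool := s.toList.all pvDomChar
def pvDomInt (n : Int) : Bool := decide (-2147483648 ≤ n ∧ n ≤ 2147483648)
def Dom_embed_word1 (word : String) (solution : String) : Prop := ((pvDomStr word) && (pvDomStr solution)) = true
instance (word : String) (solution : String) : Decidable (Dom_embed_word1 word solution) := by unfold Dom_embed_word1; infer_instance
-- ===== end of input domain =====

-- B (objective: alternative) replaces A's record-missing-then-insert-with-shifts scheme by a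
-- single pass that emits the merged string directly, testing whether a char can still be
-- matched ahead against a precomputed last-occurrence dict instead of a failed find-scan.

-- ===== PORT A =====
-- inner loop: for char in w: result = s.find(char, curr_index); …
def pvMissLoop (s : List Char) : List Char → Int → List (Char × Int)
  | [], _ => []
  | c :: w, curr =>
    let result := PySem.Chars.findFrom s [c] curr   -- s.find(char, curr_index)
    if result = -1 then (c, curr) :: pvMissLoop s w curr
    else pvMissLoop s w (result + 1)

-- for chars, pos in missing: new_solution.insert(pos+already_included, chars); already_included += 1
def pvInsLoop (missing : List (Char × Int)) (ns : List Char) : List Char :=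
  (missing.foldl (fun (st : List Char × Int) cp =>
    (PySem.List.insert st.1 (cp.2 + st.2) cp.1, st.2 + 1)) (ns, 0)).1

def embed_word1 (word : String) (solution : String) : String :=
  let w := word.toList
  let s := solution.toList
  let missing_f := pvMissLoop s w 0
  let missing_b := pvMissLoop s.reverse w.reverse 0   -- the pass over word[::-1], solution[::-1]
  let missing := if missing_f.length < missing_b.length then missing_f else missing_b
  let new_solution := if missing_f.length < missing_b.length then s else s.reverse
  let res := pvInsLoop missing new_solution
  if missing_f.length < missing_b.length then String.ofList res else String.ofList res.reverse

-- ===== PORT B =====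
-- last = {}; for i, c in enumerate(s): last[c] = i
def pvLastDict (s : List Char) : PySem.Dict Char Int :=
  (PySem.List.enumerate s).foldl (fun d ic => d.insert ic.2 ic.1) PySem.Dict.empty

-- loop body of _weave: state (out, j, misses)
def pvWeaveStep (s : List Char) (last : PySem.Dict Char Int)
    (st : List Char × Int × Nat) (c : Char) : List Char × Int × Nat :=
  if last.getD c (-1) < st.2.1 then (st.1 ++ [c], st.2.1, st.2.2 + 1)
  else
    let k := PySem.Chars.findFrom s [c] st.2.1   -- k = s.index(c, j); the guard guarantees a hit
    (st.1 ++ PySem.List.slice s (some st.2.1) (some (k + 1)), k + 1, st.2.2)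

def pvWeave (w s : List Char) : List Char × Nat :=
  let last := pvLastDict s
  let st := w.foldl (pvWeaveStep s last) ([], 0, 0)
  (st.1 ++ PySem.List.slice s (some st.2.1) none, st.2.2)

def embed_word1_alt (word : String) (solution : String) : String :=
  let f := pvWeave word.toList solution.toList
  let b := pvWeave word.toList.reverse solution.toList.reverse
  if f.2 < b.2 then String.ofList f.1 else String.ofList b.1.reverse

-- ===== PRECONDITION & SPEC =====
def Spec_embed_word1 (word : String) (solution : String) (out : String) : Prop := out = embed_word1_alt word solution
instance (word : String) (solution : String) (out : String) : Decidable (Spec_embed_word1 word solution out) := by unfold Spec_embed_word1; infer_instance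

-- ===== CLAIM (what is proved, stated in full; the proofs are below) =====
def Claim_equal_embed_word1 : Prop := ∀ (word : String) (solution : String), Dom_embed_word1 word solution → Spec_embed_word1 word solution (embed_word1 word solution)

-- ===== LEMMAS AND PROOFS =====

-- canonical recursive form of the merged output and miss count, from position j
def dGo (s : List Char) : List Char → Nat → List Char × Nat
  | [], j => (s.drop j, 0)
  | c :: w, j =>
    if PySem.Chars.findFrom s [c] (j : Int) = -1 then
      (c :: (dGo s w j).1, (dGo s w j).2 + 1)
    else
      let k := (PySem.Chars.findFrom s [c] (j : Int)).toNat
      ((s.drop j).take (k + 1 - j) ++ (dGo s w (k + 1)).1, (dGo s w (k + 1)).2)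

-- A's missing list with Nat positions
def natMiss (s : List Char) : List Char → Nat → List (Char × Nat)
  | [], _ => []
  | c :: w, j =>
    if PySem.Chars.findFrom s [c] (j : Int) = -1 then (c, j) :: natMiss s w j
    else natMiss s w ((PySem.Chars.findFrom s [c] (j : Int)).toNat + 1)

theorem singleton_infix_iff_mem {c : Char} {l : List Char} : [c] <:+: l ↔ c ∈ l := by
  constructor
  · rintro ⟨t, u, h⟩
    subst h; simp
  · intro h
    obtain ⟨t, u, rfl⟩ := List.append_of_mem h
    exact ⟨t, u, by simp⟩

theorem find_neg_iff (s : List Char) (c : Char) (j : Nat) (hj : j ≤ s.length) :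
    (PySem.Chars.findFrom s [c] (j : Int) = -1) ↔ c ∉ s.drop j := by
  rw [PySem.Chars.findFrom_natCast_eq_neg_one_iff s [c] j hj]
  exact not_congr singleton_infix_iff_mem

theorem find_pos_spec (s : List Char) (c : Char) (j : Nat) (hj : j ≤ s.length)
    (h : PySem.Chars.findFrom s [c] (j : Int) ≠ -1) :
    ∃ k : Nat, PySem.Chars.findFrom s [c] (j : Int) = (k : Int) ∧ j ≤ k ∧ k < s.length := by
  obtain ⟨h1, h2, -⟩ := PySem.Chars.findFrom_natCast_spec s [c] j hj h
  have h0 : (0 : Int) ≤ PySem.Chars.findFrom s [c] (j : Int) :=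
    le_trans (Int.natCast_nonneg j) h1
  refine ⟨(PySem.Chars.findFrom s [c] (j : Int)).toNat, (Int.toNat_of_nonneg h0).symm, by omega, ?_⟩
  by_contra hk
  rw [List.drop_eq_nil_iff.2 (by omega)] at h2
  simp [List.prefix_nil] at h2

theorem lastDict_append (s : List Char) (x : Char) :
    pvLastDict (s ++ [x]) = (pvLastDict s).insert x (s.length : Int) := by
  unfold pvLastDict
  rw [PySem.List.enumerate_append, List.foldl_append]
  simp [PySem.List.enumerate_cons, PySem.List.enumerate_nil]

theorem lastDict_lt_iff (s : List Char) (c : Char) (j : Nat) :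
    ((pvLastDict s).getD c (-1) < (j : Int)) ↔ c ∉ s.drop j := by
  induction s using List.reverseRecOn with
  | nil =>
    refine iff_of_true ?_ (by simp)
    show (-1 : Int) < (j : Int)
    omega
  | append_singleton s x ih =>
    rw [lastDict_append]
    by_cases hc : c = x
    · subst hc
      rw [PySem.Dict.getD_insert_self]
      by_cases hj : j ≤ s.length
      · rw [List.drop_append_of_le_length hj]
        simp
        omega
      · have hd : (s ++ [c]).drop j = [] := List.drop_eq_nil_iff.2 (by simp; omega)
        rw [hd]
        simp
        omega
    · rw [PySem.Dict.getD_insert_of_ne _ _ _ hc, ih]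
      by_cases hj : j ≤ s.length
      · rw [List.drop_append_of_le_length hj]
        simp [hc]
      · have h1 : s.drop j = [] := List.drop_eq_nil_iff.2 (by omega)
        have h2 : (s ++ [x]).drop j = [] := List.drop_eq_nil_iff.2 (by simp; omega)
        rw [h1, h2]

theorem weave_foldl_eq (s : List Char) : ∀ (w out : List Char) (j miss : Nat), j ≤ s.length →
    (let st := w.foldl (pvWeaveStep s (pvLastDict s)) (out, (j : Int), miss)
     (st.1 ++ PySem.List.slice s (some st.2.1) none, st.2.2))
    = (out ++ (dGo s w j).1, miss + (dGo s w j).2) := by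
  intro w
  induction w with
  | nil =>
    intro out j miss hj
    simp [dGo, PySem.List.slice_from_natCast]
  | cons c w ih =>
    intro out j miss hj
    by_cases hF : PySem.Chars.findFrom s [c] (j : Int) = -1
    · have hcond : (pvLastDict s).getD c (-1) < ((j : Nat) : Int) :=
        (lastDict_lt_iff s c j).2 ((find_neg_iff s c j hj).1 hF)
      simp only [List.foldl_cons, pvWeaveStep, if_pos hcond]
      rw [ih (out ++ [c]) j (miss + 1) hj]
      simp only [dGo, if_pos hF, List.append_assoc, List.singleton_append, Prod.mk.injEq]
      exact ⟨by trivial, by omega⟩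
    · obtain ⟨k, hk, hjk, hklen⟩ := find_pos_spec s c j hj hF
      have hcond : ¬ ((pvLastDict s).getD c (-1) < ((j : Nat) : Int)) :=
        fun h => hF ((find_neg_iff s c j hj).2 ((lastDict_lt_iff s c j).1 h))
      simp only [List.foldl_cons, pvWeaveStep, if_neg hcond]
      rw [hk]
      have h1 : ((k : Int) + 1) = (((k + 1 : Nat)) : Int) := by push_cast; ring
      rw [h1, PySem.List.slice_natCast]
      rw [ih (out ++ List.take (k + 1 - j) (List.drop j s)) (k + 1) miss (by omega)]
      have hkne : ¬ ((k : Int) = -1) := by omega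
      simp only [dGo, hk, if_neg hkne, Int.toNat_natCast, List.append_assoc]

theorem pvWeave_eq_dGo (w s : List Char) : pvWeave w s = dGo s w 0 := by
  have h := weave_foldl_eq s w [] 0 0 (Nat.zero_le _)
  simp only [Nat.cast_zero, List.nil_append, Nat.zero_add] at h
  unfold pvWeave
  rw [h]

def foldlInsNat (m : List (Char × Nat)) (ns : List Char) (n : Nat) : List Char :=
  (m.foldl (fun (st : List Char × Nat) cp => (st.1.insertIdx (cp.2 + st.2) cp.1, st.2 + 1)) (ns, n)).1

theorem insertIdx_tcd : ∀ (l : List Char) (p : Nat) (x : Char), p ≤ l.length →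
    l.insertIdx p x = l.take p ++ x :: l.drop p := by
  intro l
  induction l with
  | nil =>
    intro p x h
    have : p = 0 := by simpa using h
    subst this; simp
  | cons a l ih =>
    intro p x h
    cases p with
    | zero => simp
    | succ p =>
      rw [List.insertIdx_succ_cons]
      simp [ih p x (by simpa using h)]

theorem pvInsLoop_cast : ∀ (m : List (Char × Nat)) (ns : List Char) (n : Nat),
    (∀ q ∈ m.map Prod.snd, q + n ≤ ns.length) →
    ((m.map (fun cp => (cp.1, (cp.2 : Int)))).foldl
      (fun (st : List Char × Int) cp => (PySem.List.insert st.1 (cp.2 + st.2) cp.1, st.2 + 1))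
      (ns, (n : Int))).1 = foldlInsNat m ns n := by
  intro m
  induction m with
  | nil => intro ns n _; simp [foldlInsNat]
  | cons cp m ih =>
    obtain ⟨c, q⟩ := cp
    intro ns n hb
    have hqn : q + n ≤ ns.length := hb q (by simp)
    have hcast : ((q : Int) + (n : Int)) = (((q + n : Nat)) : Int) := by push_cast; ring
    have hcast2 : ((n : Int) + 1) = (((n + 1 : Nat)) : Int) := by push_cast; ring
    simp only [List.map_cons, List.foldl_cons, foldlInsNat]
    rw [hcast, hcast2, PySem.List.insert_natCast ns (q + n) c hqn, ← insertIdx_tcd ns (q + n) c hqn]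
    have hb' : ∀ q' ∈ m.map Prod.snd, q' + (n + 1) ≤ (ns.insertIdx (q + n) c).length := by
      intro q' hq'
      rw [List.length_insertIdx, if_pos hqn]
      have := hb q' (by simp [hq'])
      omega
    exact ih (ns.insertIdx (q + n) c) (n + 1) hb'

theorem foldlInsNat_insertIdx : ∀ (m : List (Char × Nat)) (ns : List Char) (n a : Nat) (x : Char),
    a ≤ ns.length → (∀ q ∈ m.map Prod.snd, a ≤ q + n ∧ q + n ≤ ns.length) →
    foldlInsNat m (ns.insertIdx a x) (n + 1) = (foldlInsNat m ns n).insertIdx a x := by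
  intro m
  induction m with
  | nil => intro ns n a x _ _; simp [foldlInsNat]
  | cons cp m ih =>
    obtain ⟨c, q⟩ := cp
    intro ns n a x ha hb
    obtain ⟨haq, hqn⟩ := hb q (by simp)
    simp only [foldlInsNat, List.foldl_cons]
    have he : q + (n + 1) = (q + n) + 1 := by omega
    rw [he, List.insertIdx_comm x c haq hqn]
    have hb' : ∀ q' ∈ m.map Prod.snd, a ≤ q' + (n + 1) ∧ q' + (n + 1) ≤ (ns.insertIdx (q + n) c).length := by
      intro q' hq'
      obtain ⟨h1, h2⟩ := hb q' (by simp [hq'])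
      rw [List.length_insertIdx, if_pos hqn]
      omega
    have := ih (ns.insertIdx (q + n) c) (n + 1) a x
      (by rw [List.length_insertIdx, if_pos hqn]; omega) hb'
    exact this

theorem foldlInsNat_eq_insAbs : ∀ (m : List (Char × Nat)) (ns : List Char) (n : Nat),
    (m.map Prod.snd).Pairwise (· ≤ ·) → (∀ q ∈ m.map Prod.snd, q + n ≤ ns.length) →
    foldlInsNat m ns n = m.foldr (fun cp t => t.insertIdx (cp.2 + n) cp.1) ns := by
  intro m
  induction m with
  | nil => intro ns n _ _; simp [foldlInsNat]
  | cons cp m ih =>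
    obtain ⟨c, p⟩ := cp
    intro ns n hpw hb
    have hple : ∀ q ∈ m.map Prod.snd, p ≤ q := by
      intro q hq
      exact (List.pairwise_cons.1 (by simpa using hpw)).1 q hq
    have hpn : p + n ≤ ns.length := hb p (by simp)
    have step : foldlInsNat ((c, p) :: m) ns n = foldlInsNat m (ns.insertIdx (p + n) c) (n + 1) := by
      simp [foldlInsNat]
    rw [step, foldlInsNat_insertIdx m ns n (p + n) c hpn
      (fun q hq => ⟨Nat.add_le_add_right (hple q hq) n, hb q (by simp [hq])⟩)]
    rw [ih ns n (List.Pairwise.sublist (by simp) hpw) (fun q hq => hb q (by simp [hq]))]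
    rfl

theorem natMiss_pos (s : List Char) : ∀ (w : List Char) (j : Nat), j ≤ s.length →
    ∀ p ∈ (natMiss s w j).map Prod.snd, j ≤ p ∧ p ≤ s.length := by
  intro w
  induction w with
  | nil => intro j hj p hp; simp [natMiss] at hp
  | cons c w ih =>
    intro j hj p hp
    by_cases hF : PySem.Chars.findFrom s [c] (j : Int) = -1
    · simp only [natMiss, if_pos hF, List.map_cons, List.mem_cons] at hp
      rcases hp with hp | hp
      · subst hp; exact ⟨le_refl _, hj⟩
      · exact ih j hj p hp
    · obtain ⟨k, hk, hjk, hklen⟩ := find_pos_spec s c j hj hF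
      have hkne : ¬ ((k : Int) = -1) := by omega
      simp only [natMiss, hk, if_neg hkne, Int.toNat_natCast] at hp
      obtain ⟨h1, h2⟩ := ih (k + 1) (by omega) p hp
      exact ⟨by omega, h2⟩

theorem natMiss_pairwise (s : List Char) : ∀ (w : List Char) (j : Nat), j ≤ s.length →
    ((natMiss s w j).map Prod.snd).Pairwise (· ≤ ·) := by
  intro w
  induction w with
  | nil => intro j hj; simp [natMiss]
  | cons c w ih =>
    intro j hj
    by_cases hF : PySem.Chars.findFrom s [c] (j : Int) = -1
    · simp only [natMiss, if_pos hF, List.map_cons]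
      rw [List.pairwise_cons]
      exact ⟨fun q hq => (natMiss_pos s w j hj q hq).1, ih j hj⟩
    · obtain ⟨k, hk, hjk, hklen⟩ := find_pos_spec s c j hj hF
      have hkne : ¬ ((k : Int) = -1) := by omega
      simp only [natMiss, hk, if_neg hkne, Int.toNat_natCast]
      exact ih (k + 1) (by omega)

theorem missLoop_cast (s : List Char) : ∀ (w : List Char) (j : Nat), j ≤ s.length →
    pvMissLoop s w (j : Int) = (natMiss s w j).map (fun cp => (cp.1, (cp.2 : Int))) := by
  intro w
  induction w with
  | nil => intro j hj; simp [pvMissLoop, natMiss]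
  | cons c w ih =>
    intro j hj
    by_cases hF : PySem.Chars.findFrom s [c] (j : Int) = -1
    · simp only [pvMissLoop, natMiss, if_pos hF, List.map_cons]
      exact congrArg _ (ih j hj)
    · obtain ⟨k, hk, hjk, hklen⟩ := find_pos_spec s c j hj hF
      have hkne : ¬ ((k : Int) = -1) := by omega
      simp only [pvMissLoop, natMiss, hk, if_neg hkne, Int.toNat_natCast]
      have h1 : ((k : Int) + 1) = (((k + 1 : Nat)) : Int) := by push_cast; ring
      rw [h1]
      exact ih (k + 1) (by omega)

theorem insAbs_eq_dGo (s : List Char) : ∀ (w : List Char) (j : Nat), j ≤ s.length →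
    (natMiss s w j).foldr (fun cp t => t.insertIdx cp.2 cp.1) s = s.take j ++ (dGo s w j).1
    ∧ (natMiss s w j).length = (dGo s w j).2 := by
  intro w
  induction w with
  | nil =>
    intro j hj
    simp [natMiss, dGo]
  | cons c w ih =>
    intro j hj
    by_cases hF : PySem.Chars.findFrom s [c] (j : Int) = -1
    · obtain ⟨ih1, ih2⟩ := ih j hj
      have hlen : j ≤ (s.take j ++ (dGo s w j).1).length := by
        simp [List.length_take]; omega
      constructor
      · simp only [natMiss, if_pos hF, List.foldr_cons, ih1, dGo]
        rw [insertIdx_tcd _ j c hlen,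
          List.take_left' (by simp [List.length_take]; omega),
          List.drop_left' (by simp [List.length_take]; omega)]
      · simp only [natMiss, if_pos hF, List.length_cons, ih2, dGo]
    · obtain ⟨k, hk, hjk, hklen⟩ := find_pos_spec s c j hj hF
      have hkne : ¬ ((k : Int) = -1) := by omega
      obtain ⟨ih1, ih2⟩ := ih (k + 1) (by omega)
      have htake : s.take (k + 1) = s.take j ++ (s.drop j).take (k + 1 - j) := by
        conv_lhs => rw [show k + 1 = j + (k + 1 - j) by omega]
        rw [List.take_add]
      constructor
      · simp only [natMiss, hk, if_neg hkne, Int.toNat_natCast, ih1, dGo]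
        rw [htake, List.append_assoc]
      · simp only [natMiss, hk, if_neg hkne, Int.toNat_natCast, ih2, dGo]

theorem direction_eq (w s : List Char) :
    pvInsLoop (pvMissLoop s w 0) s = (pvWeave w s).1
    ∧ (pvMissLoop s w 0).length = (pvWeave w s).2 := by
  have hm : pvMissLoop s w 0 = (natMiss s w 0).map (fun cp => (cp.1, (cp.2 : Int))) := by
    have := missLoop_cast s w 0 (Nat.zero_le _)
    simpa using this
  have hbounds : ∀ q ∈ (natMiss s w 0).map Prod.snd, q + 0 ≤ s.length := by
    intro q hq
    have := (natMiss_pos s w 0 (Nat.zero_le _) q hq).2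
    omega
  have hcast : pvInsLoop (pvMissLoop s w 0) s = foldlInsNat (natMiss s w 0) s 0 := by
    rw [hm]
    unfold pvInsLoop
    have := pvInsLoop_cast (natMiss s w 0) s 0 hbounds
    simpa using this
  have habs : foldlInsNat (natMiss s w 0) s 0
      = (natMiss s w 0).foldr (fun cp t => t.insertIdx cp.2 cp.1) s := by
    rw [foldlInsNat_eq_insAbs (natMiss s w 0) s 0 (natMiss_pairwise s w 0 (Nat.zero_le _)) hbounds]
    simp
  obtain ⟨h1, h2⟩ := insAbs_eq_dGo s w 0 (Nat.zero_le _)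
  constructor
  · rw [hcast, habs, h1, pvWeave_eq_dGo]
    simp
  · rw [hm, List.length_map, h2, pvWeave_eq_dGo]

-- ===== VERDICT (by name: the statement is the Claim_ definition above) =====
theorem embed_word1_spec : Claim_equal_embed_word1 := by
  unfold Claim_equal_embed_word1
  intro word solution _
  unfold Spec_embed_word1
  obtain ⟨e1f, e2f⟩ := direction_eq word.toList solution.toList
  obtain ⟨e1b, e2b⟩ := direction_eq word.toList.reverse solution.toList.reverse
  by_cases h : (pvMissLoop solution.toList word.toList 0).length
      < (pvMissLoop solution.toList.reverse word.toList.reverse 0).length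
  · have h' : (pvWeave word.toList solution.toList).2
        < (pvWeave word.toList.reverse solution.toList.reverse).2 := by
      rw [← e2f, ← e2b]; exact h
    simp only [embed_word1, embed_word1_alt, if_pos h, if_pos h']
    rw [e1f]
  · have h' : ¬ ((pvWeave word.toList solution.toList).2
        < (pvWeave word.toList.reverse solution.toList.reverse).2) := by
      rw [← e2f, ← e2b]; exact h
    simp only [embed_word1, embed_word1_alt, if_neg h, if_neg h']
    rw [e1b]
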